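-- pv_equiv track=rewrite | github.com/Tarzelf/steam-intel | app/collectors/genres.py | _calculate_price_distribution
-- ===== SOURCE A (Python) =====
-- def _calculate_price_distribution(prices: list) -> dict:
--     """Bucket prices into ranges."""
--     distribution = {
--         "free": 0,
--         "under_5": 0,
--         "5_to_10": 0,
--         "10_to_20": 0,
--         "20_to_30": 0,
--         "over_30": 0
--     }
--     for price in prices:
--         if price == 0:
--             distribution["free"] += 1
--         elif price < 500:
--             distribution["under_5"] += 1
--         elif price < 1000:
--             distribution["5_to_10"] += 1
--         elif price < 2000:
--             distribution["10_to_20"] += 1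
--         elif price < 3000:
--             distribution["20_to_30"] += 1
--         else:
--             distribution["over_30"] += 1
--     return distribution
-- ===== SOURCE B (Python) =====
-- def _calculate_price_distribution(prices: list) -> dict:
--     """Bucket prices into ranges: each bucket is an independent filtered count."""
--     buckets = {
--         "free": lambda p: p == 0,
--         "under_5": lambda p: p != 0 and p < 500,
--         "5_to_10": lambda p: 500 <= p < 1000,
--         "10_to_20": lambda p: 1000 <= p < 2000,
--         "20_to_30": lambda p: 2000 <= p < 3000,
--         "over_30": lambda p: p >= 3000,
--     }
--     return {name: sum(1 for p in prices if ok(p)) for name, ok in buckets.items()}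
-- ===== Notes on version B (the rewrite author's own statement) =====
-- stated objective: alternative
-- what changed: A threads one mutable dict through a single loop with an if/elif chain; B defines each bucket by its own predicate and computes the dict as six independent filtered counts (a dict comprehension over a predicate table).
import Mathlib
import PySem

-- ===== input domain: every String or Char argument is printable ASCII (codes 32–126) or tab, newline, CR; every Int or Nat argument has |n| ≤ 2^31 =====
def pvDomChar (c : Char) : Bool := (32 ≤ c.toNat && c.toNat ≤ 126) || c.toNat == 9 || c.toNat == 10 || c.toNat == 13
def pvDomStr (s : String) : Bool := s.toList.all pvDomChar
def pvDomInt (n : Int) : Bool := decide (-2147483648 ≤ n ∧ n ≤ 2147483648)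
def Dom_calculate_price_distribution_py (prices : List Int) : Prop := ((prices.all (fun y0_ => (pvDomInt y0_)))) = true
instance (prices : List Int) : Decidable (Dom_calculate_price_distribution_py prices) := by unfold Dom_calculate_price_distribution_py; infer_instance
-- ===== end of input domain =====

-- B replaces A's single accumulator loop with six independent filtered counts (alternative decomposition, same cost).


-- ===== PORT A =====
-- one loop step of A: the if/elif chain incrementing the matching bucket
def pdStep (d : PySem.Dict String Int) (price : Int) : PySem.Dict String Int :=
  if price == 0 then d.modify "free" 0 (· + 1)
  else if price < 500 then d.modify "under_5" 0 (· + 1)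
  else if price < 1000 then d.modify "5_to_10" 0 (· + 1)
  else if price < 2000 then d.modify "10_to_20" 0 (· + 1)
  else if price < 3000 then d.modify "20_to_30" 0 (· + 1)
  else d.modify "over_30" 0 (· + 1)

def calculate_price_distribution_py (prices : List Int) : List (String × Int) :=
  (prices.foldl pdStep
    (PySem.Dict.ofList [("free", 0), ("under_5", 0), ("5_to_10", 0),
                        ("10_to_20", 0), ("20_to_30", 0), ("over_30", 0)])).items

-- ===== PORT B =====
-- one bucket of B: the filtered count 'sum(1 for p in prices if ok(p))'
def pdCount (prices : List Int) (ok : Int → Bool) : Int :=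
  (prices.countP ok : Int)

def calculate_price_distribution_py_alt (prices : List Int) : List (String × Int) :=
  [("free", pdCount prices (fun p => p == 0)),
   ("under_5", pdCount prices (fun p => p != 0 && p < 500)),
   ("5_to_10", pdCount prices (fun p => 500 ≤ p && p < 1000)),
   ("10_to_20", pdCount prices (fun p => 1000 ≤ p && p < 2000)),
   ("20_to_30", pdCount prices (fun p => 2000 ≤ p && p < 3000)),
   ("over_30", pdCount prices (fun p => 3000 ≤ p))]

-- ===== PRECONDITION & SPEC =====
def Spec_calculate_price_distribution_py (prices : List Int) (out : List (String × Int)) : Prop := out = calculate_price_distribution_py_alt prices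
instance (prices : List Int) (out : List (String × Int)) : Decidable (Spec_calculate_price_distribution_py prices out) := by unfold Spec_calculate_price_distribution_py; infer_instance

-- ===== CLAIM (what is proved, stated in full; the proofs are below) =====
def Claim_equal_calculate_price_distribution_py : Prop := ∀ (prices : List Int), Dom_calculate_price_distribution_py prices → Spec_calculate_price_distribution_py prices (calculate_price_distribution_py prices)

-- ===== LEMMAS AND PROOFS =====

-- invariant of A's loop: folding pdStep over a six-bucket literal dict adds each bucket's count
lemma pdFold_shape (prices : List Int) : ∀ (a b c e f g : Int),
    prices.foldl pdStep
      (PySem.Dict.mk [("free", a), ("under_5", b), ("5_to_10", c),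
                      ("10_to_20", e), ("20_to_30", f), ("over_30", g)]) =
    PySem.Dict.mk
      [("free", a + prices.countP (fun p => p == 0)),
       ("under_5", b + prices.countP (fun p => p != 0 && p < 500)),
       ("5_to_10", c + prices.countP (fun p => 500 ≤ p && p < 1000)),
       ("10_to_20", e + prices.countP (fun p => 1000 ≤ p && p < 2000)),
       ("20_to_30", f + prices.countP (fun p => 2000 ≤ p && p < 3000)),
       ("over_30", g + prices.countP (fun p => 3000 ≤ p))] := by
  induction prices with
  | nil => intro a b c e f g; simp
  | cons x xs ih =>
    intro a b c e f g
    simp only [List.foldl_cons, pdStep]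
    split_ifs with h1 h2 h3 h4 h5 <;>
    · simp [PySem.Dict.modify, PySem.Dict.insert, PySem.Dict.getD,
        PySem.Dict.get?, PySem.Dict.contains]
      rw [ih]
      simp only [PySem.Dict.mk.injEq, List.cons.injEq, Prod.mk.injEq,
        List.countP_cons, and_true, true_and]
      simp_all [decide_eq_true_eq]
      omega

-- ===== VERDICT (by name: the statement is the Claim_ definition above) =====
theorem calculate_price_distribution_py_spec : Claim_equal_calculate_price_distribution_py := by
  intro prices _
  show _ = _
  have h0 : PySem.Dict.ofList [("free", (0:Int)), ("under_5", 0), ("5_to_10", 0),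
      ("10_to_20", 0), ("20_to_30", 0), ("over_30", 0)] =
      PySem.Dict.mk [("free", 0), ("under_5", 0), ("5_to_10", 0),
      ("10_to_20", 0), ("20_to_30", 0), ("over_30", 0)] := by decide
  simp only [calculate_price_distribution_py, calculate_price_distribution_py_alt, pdCount]
  rw [h0, pdFold_shape]
  simp
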